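-- pv_equiv track=rewrite | github.com/petterho/Personal-Projects | src/personal_projects/Div/yellowstoneperm.py | yellowstone
-- ===== SOURCE A (Python) =====
-- def gcd(a, b):
--     if a == 0:
--         return b
--     elif b == 0:
--         return a
--     else:
--         if b > a:
--             a, b = b, a
--
--         r = a % b
--         gcd_num = gcd(b, r)
--         return gcd_num
--
-- def yellowstone(n=1000):
--     list_of_possibles = [i for i in range(1, n+1)]
--     perm = []
--     for i in range(3):
--         perm.append(list_of_possibles.pop(0))
--     while True:
--         found_number = False
--         for index, elem in enumerate(list_of_possibles):
--             if gcd(elem, perm[-1]) == 1 and gcd(elem, perm[-2]) != 1: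
--                 perm.append(list_of_possibles.pop(index))
--                 found_number = True
--                 break
--         if not found_number:
--             break
--     return perm
-- ===== SOURCE B (Python) =====
-- def yellowstone(n=1000):
--     # Yellowstone permutation for n >= 3 (A raises IndexError for n < 3).
--     def gcd(a, b):
--         while b:
--             a, b = b, a % b
--         return a
--     perm = [1, 2, 3]
--     used = {1, 2, 3}
--     while True:
--         p1, p2 = perm[-1], perm[-2]
--         nxt = next((k for k in range(4, n + 1)
--                     if k not in used and gcd(k, p1) == 1 and gcd(k, p2) != 1), 0)
--         if nxt == 0:
--             break
--         perm.append(nxt)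
--         used.add(nxt)
--     return perm
-- ===== Notes on version B (the rewrite author's own statement) =====
-- stated objective: alternative
-- what changed: B replaces A's mutated candidate list (pop(index) inside enumerate) by a constant 'used' set scanned over range(4,n+1), and A's recursive swap-based gcd by the iterative Euclid loop; the candidate pool is never rebuilt or shifted.
import Mathlib
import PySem

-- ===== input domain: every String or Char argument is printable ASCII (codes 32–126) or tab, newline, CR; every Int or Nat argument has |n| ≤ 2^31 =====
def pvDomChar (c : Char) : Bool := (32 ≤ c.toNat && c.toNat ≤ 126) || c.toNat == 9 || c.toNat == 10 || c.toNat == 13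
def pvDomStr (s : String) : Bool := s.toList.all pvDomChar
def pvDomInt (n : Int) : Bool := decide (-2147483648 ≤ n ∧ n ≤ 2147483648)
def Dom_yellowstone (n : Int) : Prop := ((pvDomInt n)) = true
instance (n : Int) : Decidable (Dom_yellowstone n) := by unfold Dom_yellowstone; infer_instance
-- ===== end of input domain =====

-- B replaces A's mutated candidate list and recursive gcd by a constant 'used' set scanned
-- over the range plus an iterative Euclid gcd (objective: alternative).


-- ===== PORT A =====
-- Python's gcd is recursive and (on the positive arguments yellowstone feeds it) its depth is
-- < |b| + 1; the fuel parameter bounds that depth, and all call sites pass |b| + 1 (exact there).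
def gcdA : Nat → Int → Int → Int
  | 0, _, _ => 0
  | fuel + 1, a, b =>
    if a = 0 then b
    else if b = 0 then a
    else
      let p := if a < b then (b, a) else (a, b)
      gcdA fuel p.2 (PySem.Int.mod p.1 p.2)

-- 'for index, elem in enumerate(list_of_possibles): if cond: perm.append(pop(index)); break':
-- returns the list with the first matching element removed, together with that element.
def searchA (p1 p2 : Int) : List Int → Option (List Int × Int)
  | [] => none
  | x :: xs =>
    if gcdA (p1.natAbs + 1) x p1 == 1 && gcdA (p2.natAbs + 1) x p2 != 1 then
      some (xs, x)
    else
      match searchA p1 p2 xs with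
      | some (rest, e) => some (x :: rest, e)
      | none => none

theorem searchA_length {p1 p2 : Int} : ∀ {l : List Int} {r : List Int × Int},
    searchA p1 p2 l = some r → r.1.length < l.length := by
  intro l
  induction l with
  | nil => intro r h; simp [searchA] at h
  | cons x xs ih =>
    intro r h
    simp only [searchA] at h
    split at h
    · cases h; simp
    · cases hs : searchA p1 p2 xs with
      | none => rw [hs] at h; cases h
      | some r' =>
        rw [hs] at h; cases h
        have := ih hs
        simp
        omega

-- the 'while True' loop of A; state = (list_of_possibles, perm)
def loopA (possibles perm : List Int) : List Int :=
  match h : searchA (PySem.List.pyGetD perm (-1) 0) (PySem.List.pyGetD perm (-2) 0) possibles with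
  | some r => loopA r.1 (perm ++ [r.2])
  | none => perm
termination_by possibles.length
decreasing_by exact searchA_length h

def yellowstone (n : Int) : List Int :=
  let listOfPossibles := PySem.List.pyRange 1 (n + 1) 1
  -- 'for i in range(3): perm.append(list_of_possibles.pop(0))' (pop on [] raises: outside Pre_)
  let st := (List.range 3).foldl
    (fun (st : List Int × List Int) _ =>
      match st.1 with
      | [] => st
      | x :: xs => (xs, st.2 ++ [x]))
    (listOfPossibles, [])
  loopA st.1 st.2

-- ===== PORT B =====
theorem pymod_natAbs_lt (a b : Int) (hb : ¬ b = 0) :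
    (PySem.Int.mod a b).natAbs < b.natAbs := by
  rcases lt_or_gt_of_ne hb with h | h
  · have := PySem.Int.mod_neg_bounds (a := a) h
    omega
  · have h1 := PySem.Int.mod_nonneg (a := a) h
    have h2 := PySem.Int.mod_lt (a := a) h
    omega

-- 'while b: a, b = b, a % b'
def gcdB (a b : Int) : Int :=
  if h : b = 0 then a else gcdB b (PySem.Int.mod a b)
termination_by b.natAbs
decreasing_by exact pymod_natAbs_lt a b h

-- termination helper for loopB: picking a fresh element shrinks the unused part of the range
theorem contains_add_eq (used : PySem.Set Int) (k j : Int) :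
    (!(PySem.Set.contains (PySem.Set.add used k) j)) =
      (!(j == k) && !(PySem.Set.contains used j)) := by
  by_cases h1 : j ∈ used <;> by_cases h2 : j = k <;>
    simp [PySem.Set.mem_add, h1, h2]

theorem filter_add_eq (n : Int) (used : PySem.Set Int) (k : Int) :
    ((PySem.List.pyRange 4 (n + 1) 1).filter
        (fun j => !(PySem.Set.contains (PySem.Set.add used k) j)))
      = ((PySem.List.pyRange 4 (n + 1) 1).filter
        (fun j => !(PySem.Set.contains used j))).filter (fun j => !(j == k)) := by
  rw [List.filter_filter]
  exact List.filter_congr (fun x _ => contains_add_eq used k x)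

theorem filter_add_lt (n : Int) (used : PySem.Set Int) (k : Int)
    (hk : k ∈ PySem.List.pyRange 4 (n + 1) 1) (hc : PySem.Set.contains used k = false) :
    ((PySem.List.pyRange 4 (n + 1) 1).filter
        (fun j => !(PySem.Set.contains (PySem.Set.add used k) j))).length
      < ((PySem.List.pyRange 4 (n + 1) 1).filter
        (fun j => !(PySem.Set.contains used j))).length := by
  rw [filter_add_eq]
  have hku : k ∉ used := by simpa using hc
  refine List.length_filter_lt_length_iff_exists.mpr ⟨k, ?_, by simp⟩
  simp [List.mem_filter, hk, hku]

-- the 'while True' loop of B; state = (used, perm); the generator-with-default 'next(…, 0)'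
-- is find? (0 is never a candidate, so the sentinel corresponds exactly to none)
def loopB (n : Int) (used : PySem.Set Int) (perm : List Int) : List Int :=
  let p1 := PySem.List.pyGetD perm (-1) 0
  let p2 := PySem.List.pyGetD perm (-2) 0
  match h : (PySem.List.pyRange 4 (n + 1) 1).find?
      (fun k => !(PySem.Set.contains used k) && (gcdB k p1 == 1 && gcdB k p2 != 1)) with
  | some k => loopB n (PySem.Set.add used k) (perm ++ [k])
  | none => perm
termination_by ((PySem.List.pyRange 4 (n + 1) 1).filter (fun j => !(PySem.Set.contains used j))).length
decreasing_by
  exact filter_add_lt n used k (List.mem_of_find?_eq_some h)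
    (by have := List.find?_some h; simp at this; simpa using this.1)

def yellowstone_alt (n : Int) : List Int :=
  loopB n (PySem.Set.ofList [1, 2, 3]) [1, 2, 3]

-- ===== PRECONDITION & SPEC =====
-- A pops three seed elements unconditionally: for n < 3 it raises IndexError, so those inputs
-- are excluded (A returns on exactly the inputs admitted here).
def Pre_yellowstone (n : Int) : Prop := 3 ≤ n
instance (n : Int) : Decidable (Pre_yellowstone n) := by unfold Pre_yellowstone; infer_instance
def pvWitness_yellowstone : Int := (7)

def Spec_yellowstone (n : Int) (out : List Int) : Prop := out = yellowstone_alt n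
instance (n : Int) (out : List Int) : Decidable (Spec_yellowstone n out) := by unfold Spec_yellowstone; infer_instance

-- ===== CLAIM (what is proved, stated in full; the proofs are below) =====
def Claim_equal_yellowstone : Prop := ∀ (n : Int), Dom_yellowstone n → Pre_yellowstone n → Spec_yellowstone n (yellowstone n)

-- ===== LEMMAS AND PROOFS =====

theorem pyGetD_self_or_mem (xs : List Int) (i d : Int) :
    PySem.List.pyGetD xs i d = d ∨ PySem.List.pyGetD xs i d ∈ xs := by
  unfold PySem.List.pyGetD
  cases h : PySem.List.pyGet? xs i with
  | none => left; rfl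
  | some a => right; simpa using PySem.List.mem_of_pyGet?_eq_some xs h

theorem gcdB_eq_gcd (a b : Int) (ha : 0 ≤ a) (hb : 0 ≤ b) :
    gcdB a b = (Nat.gcd a.toNat b.toNat : Int) := by
  by_cases h : b = 0
  · subst h
    rw [gcdB]
    simp [Int.toNat_of_nonneg ha]
  · have hbpos : 0 < b := lt_of_le_of_ne hb (Ne.symm h)
    have h1 : 0 ≤ PySem.Int.mod a b := PySem.Int.mod_nonneg (a := a) hbpos
    have h2 : PySem.Int.mod a b < b := PySem.Int.mod_lt (a := a) hbpos
    rw [gcdB]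
    rw [dif_neg h]
    rw [gcdB_eq_gcd b (PySem.Int.mod a b) hb h1]
    rw [PySem.Int.mod_eq_emod_of_pos hbpos, Int.toNat_emod ha hbpos.le]
    rw [Nat.gcd_comm, ← Nat.gcd_rec, Nat.gcd_comm]
termination_by b.natAbs
decreasing_by exact pymod_natAbs_lt a b h

theorem gcdA_eq_gcd : ∀ (fuel : Nat) (a b : Int), 1 ≤ a → 0 ≤ b → b.toNat < fuel →
    gcdA fuel a b = (Nat.gcd a.toNat b.toNat : Int) := by
  intro fuel
  induction fuel with
  | zero => intro a b _ _ hf; omega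
  | succ fuel ih =>
    intro a b ha hb hf
    simp only [gcdA]
    rw [if_neg (by omega)]
    by_cases hb0 : b = 0
    · subst hb0
      rw [if_pos rfl]
      simp [Int.toNat_of_nonneg (by omega : (0:Int) ≤ a)]
    · rw [if_neg hb0]
      have hbpos : 0 < b := lt_of_le_of_ne hb (Ne.symm hb0)
      by_cases hlt : a < b
      · simp only [if_pos hlt]
        have hr1 : 0 ≤ PySem.Int.mod b a := PySem.Int.mod_nonneg (a := b) (by omega)
        have hr2 : PySem.Int.mod b a < a := PySem.Int.mod_lt (a := b) (by omega)
        rw [ih a (PySem.Int.mod b a) ha hr1 (by omega)]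
        congr 1
        rw [PySem.Int.mod_eq_emod_of_pos (by omega : (0:Int) < a),
          Int.toNat_emod hb (by omega : (0:Int) ≤ a)]
        rw [Nat.gcd_comm a.toNat, ← Nat.gcd_rec]
      · simp only [if_neg hlt]
        have hr1 : 0 ≤ PySem.Int.mod a b := PySem.Int.mod_nonneg (a := a) hbpos
        have hr2 : PySem.Int.mod a b < b := PySem.Int.mod_lt (a := a) hbpos
        rw [ih b (PySem.Int.mod a b) (by omega) hr1 (by omega)]
        rw [PySem.Int.mod_eq_emod_of_pos hbpos, Int.toNat_emod (by omega) hbpos.le]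
        rw [Nat.gcd_comm b.toNat, ← Nat.gcd_rec, Nat.gcd_comm]

-- the Bool tested by A's inner loop equals the one tested by B's generator
theorem cond_eq (x p1 p2 : Int) (hx : 1 ≤ x) (h1 : 0 ≤ p1) (h2 : 0 ≤ p2) :
    (gcdA (p1.natAbs + 1) x p1 == 1 && gcdA (p2.natAbs + 1) x p2 != 1)
      = (gcdB x p1 == 1 && gcdB x p2 != 1) := by
  rw [gcdA_eq_gcd _ _ _ hx h1 (by omega), gcdA_eq_gcd _ _ _ hx h2 (by omega),
    gcdB_eq_gcd x p1 (by omega) h1, gcdB_eq_gcd x p2 (by omega) h2]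

theorem searchA_eq (p1 p2 : Int) (l : List Int) :
    searchA p1 p2 l =
      (l.find? (fun x => gcdA (p1.natAbs + 1) x p1 == 1 && gcdA (p2.natAbs + 1) x p2 != 1)).map
        (fun e => (l.eraseP (fun x => gcdA (p1.natAbs + 1) x p1 == 1 && gcdA (p2.natAbs + 1) x p2 != 1), e)) := by
  induction l with
  | nil => rfl
  | cons x xs ih =>
    simp only [searchA, List.find?, List.eraseP_cons]
    cases hc : (gcdA (p1.natAbs + 1) x p1 == 1 && gcdA (p2.natAbs + 1) x p2 != 1) with
    | true => simp
    | false =>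
      simp only [Bool.false_eq_true, if_false, ih]
      cases hf : xs.find? (fun x => gcdA (p1.natAbs + 1) x p1 == 1 && gcdA (p2.natAbs + 1) x p2 != 1) <;>
        simp

theorem find?_congr_mem {l : List Int} {p q : Int → Bool} (h : ∀ x ∈ l, p x = q x) :
    l.find? p = l.find? q := by
  induction l with
  | nil => rfl
  | cons x xs ih =>
    simp only [List.find?]
    rw [h x (by simp)]
    cases q x
    · exact ih fun y hy => h y (by simp [hy])
    · rfl

theorem find?_filter_eq (l : List Int) (p q : Int → Bool) :
    (l.filter q).find? p = l.find? (fun x => q x && p x) := by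
  induction l with
  | nil => rfl
  | cons x xs ih =>
    cases hq : q x with
    | false => simp [hq, List.find?, ih]
    | true => cases hp : p x <;> simp [hq, hp, List.find?, ih]

theorem eraseP_of_find? {l : List Int} {p : Int → Bool} {e : Int}
    (hnd : l.Nodup) (h : l.find? p = some e) :
    l.eraseP p = l.filter (fun x => !(x == e)) := by
  induction l with
  | nil => cases h
  | cons x xs ih =>
    simp only [List.find?] at h
    simp only [List.eraseP_cons, List.filter_cons]
    cases hp : p x with
    | true =>
      rw [hp] at h
      cases h
      simp only [BEq.rfl, Bool.not_true, if_false, Bool.false_eq_true]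
      have : ∀ y ∈ xs, (!(y == e)) = true := by
        intro y hy
        have : y ≠ e := by
          intro he; subst he
          exact (List.nodup_cons.mp hnd).1 hy
        simpa using this
      rw [List.filter_congr (fun y hy => this y hy)]
      simp
    | false =>
      rw [hp] at h
      have hxe : x ≠ e := by
        intro he; subst he
        exact (List.nodup_cons.mp hnd).1 (List.mem_of_find?_eq_some h)
      have : (!(x == e)) = true := by simpa using hxe
      rw [this, ih (List.nodup_cons.mp hnd).2 h]
      simp

theorem loops_eq (n : Int) :
    ∀ (m : Nat) (used : PySem.Set Int) (perm : List Int),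
      (∀ x ∈ perm, 0 ≤ x) →
      ((PySem.List.pyRange 4 (n + 1) 1).filter (fun j => !(PySem.Set.contains used j))).length = m →
      loopA ((PySem.List.pyRange 4 (n + 1) 1).filter (fun j => !(PySem.Set.contains used j))) perm
        = loopB n used perm := by
  intro m
  induction m using Nat.strong_induction_on with
  | _ m ih =>
    intro used perm hperm hm
    have hp1 : 0 ≤ PySem.List.pyGetD perm (-1) 0 := by
      rcases pyGetD_self_or_mem perm (-1) 0 with h | h
      · omega
      · exact hperm _ h
    have hp2 : 0 ≤ PySem.List.pyGetD perm (-2) 0 := by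
      rcases pyGetD_self_or_mem perm (-2) 0 with h | h
      · omega
      · exact hperm _ h
    have hfind :
        ((PySem.List.pyRange 4 (n + 1) 1).filter (fun j => !(PySem.Set.contains used j))).find?
            (fun x => gcdA ((PySem.List.pyGetD perm (-1) 0).natAbs + 1) x (PySem.List.pyGetD perm (-1) 0) == 1 &&
              gcdA ((PySem.List.pyGetD perm (-2) 0).natAbs + 1) x (PySem.List.pyGetD perm (-2) 0) != 1)
          = (PySem.List.pyRange 4 (n + 1) 1).find?
            (fun k => !(PySem.Set.contains used k) &&
              (gcdB k (PySem.List.pyGetD perm (-1) 0) == 1 && gcdB k (PySem.List.pyGetD perm (-2) 0) != 1)) := by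
      rw [find?_filter_eq]
      refine find?_congr_mem fun x hx => ?_
      have hx4 : 4 ≤ x := (PySem.List.mem_pyRange_one.mp hx).1
      rw [cond_eq x _ _ (by omega) hp1 hp2]
    rw [loopA.eq_def, loopB.eq_def]
    simp only []
    rw [searchA_eq, hfind]
    cases hk : (PySem.List.pyRange 4 (n + 1) 1).find?
        (fun k => !(PySem.Set.contains used k) &&
          (gcdB k (PySem.List.pyGetD perm (-1) 0) == 1 && gcdB k (PySem.List.pyGetD perm (-2) 0) != 1)) with
    | none => simp
    | some k =>
      simp only [Option.map_some]
      have hkmem : k ∈ PySem.List.pyRange 4 (n + 1) 1 := List.mem_of_find?_eq_some hk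
      have hk4 : 4 ≤ k := (PySem.List.mem_pyRange_one.mp hkmem).1
      have hkc : PySem.Set.contains used k = false := by
        have := List.find?_some hk
        simp only [Bool.and_eq_true, Bool.not_eq_true'] at this
        exact this.1
      have hfil : ((PySem.List.pyRange 4 (n + 1) 1).filter (fun j => !(PySem.Set.contains used j))).eraseP
            (fun x => gcdA ((PySem.List.pyGetD perm (-1) 0).natAbs + 1) x (PySem.List.pyGetD perm (-1) 0) == 1 &&
              gcdA ((PySem.List.pyGetD perm (-2) 0).natAbs + 1) x (PySem.List.pyGetD perm (-2) 0) != 1)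
          = (PySem.List.pyRange 4 (n + 1) 1).filter
              (fun j => !(PySem.Set.contains (PySem.Set.add used k) j)) := by
        rw [eraseP_of_find? (List.Nodup.filter _ (PySem.List.nodup_pyRange_one _ _)) (by rw [hfind]; exact hk)]
        rw [filter_add_eq]
      rw [hfil]
      exact ih _ (by rw [← hm]; exact filter_add_lt n used k hkmem hkc) (PySem.Set.add used k)
        (perm ++ [k])
        (by intro x hx
            rcases List.mem_append.mp hx with h | h
            · exact hperm _ h
            · simp at h; omega)
        rfl

-- ===== VERDICT (by name: the statement is the Claim_ definition above) =====
theorem yellowstone_spec : Claim_equal_yellowstone := by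
  intro n _ hpre
  have h3 : (3:Int) ≤ n := hpre
  show yellowstone n = yellowstone_alt n
  unfold yellowstone yellowstone_alt
  have hr : PySem.List.pyRange 1 (n + 1) 1 = 1 :: 2 :: 3 :: PySem.List.pyRange 4 (n + 1) 1 := by
    rw [PySem.List.pyRange_one_append 1 4 (n + 1) (by omega) (by omega)]
    rfl
  have hrange3 : List.range 3 = [0, 1, 2] := rfl
  rw [hr, hrange3]
  simp only [List.foldl, List.nil_append]
  have hfil : (PySem.List.pyRange 4 (n + 1) 1).filter
      (fun j => !(PySem.Set.contains (PySem.Set.ofList [1, 2, 3]) j)) = PySem.List.pyRange 4 (n + 1) 1 := by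
    refine List.filter_eq_self.mpr fun x hx => ?_
    have hx4 : 4 ≤ x := (PySem.List.mem_pyRange_one.mp hx).1
    have : x ∉ PySem.Set.ofList [(1:Int), 2, 3] := by
      rw [PySem.Set.mem_ofList]
      intro h; simp at h; omega
    simpa using this
  rw [← hfil]
  exact loops_eq n _ (PySem.Set.ofList [1, 2, 3]) [1, 2, 3]
    (by intro x hx; simp at hx; omega) rfl
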